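-- pv_equiv track=rewrite | github.com/damiankiwi/kurs_python | 18/065.py | najdluzsze_slowo_podciag
-- ===== SOURCE A (Python) =====
-- def najdluzsze_slowo_podciag(slowo, podciagi):
--     najdluzsze = ""
--     for podciag in podciagi:
--         i, j = 0, 0
--         while i < len(slowo) and j < len(podciag):
--             if slowo[i] == podciag[j]:
--                 j += 1
--             i += 1
--         if j == len(podciag) and len(podciag) > len(najdluzsze):
--             najdluzsze = podciag
--     return najdluzsze
-- ===== SOURCE B (Python) =====
-- def najdluzsze_slowo_podciag(slowo, podciagi):
--     # Subsequence automaton: nxt[i] maps each character to its first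
--     # occurrence at position >= i in slowo; each candidate is then checked
--     # by jumping through the table instead of rescanning slowo.
--     n = len(slowo)
--     nxt = [None] * (n + 1)
--     nxt[n] = {}
--     for i in range(n - 1, -1, -1):
--         d = dict(nxt[i + 1])
--         d[slowo[i]] = i
--         nxt[i] = d
--     def is_sub(t):
--         i = 0
--         for c in t:
--             j = nxt[i].get(c)
--             if j is None:
--                 return False
--             i = j + 1
--         return True
--     return max((p for p in podciagi if is_sub(p)), key=len, default="")
-- ===== Notes on version B (the rewrite author's own statement) =====
-- stated objective: faster
-- what changed: A rescans slowo with a two-pointer loop for every candidate; B builds a subsequence automaton (next-occurrence table over slowo) once and checks each candidate by table jumps, then takes the first longest survivor via max(key=len, default='').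
import Mathlib
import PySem

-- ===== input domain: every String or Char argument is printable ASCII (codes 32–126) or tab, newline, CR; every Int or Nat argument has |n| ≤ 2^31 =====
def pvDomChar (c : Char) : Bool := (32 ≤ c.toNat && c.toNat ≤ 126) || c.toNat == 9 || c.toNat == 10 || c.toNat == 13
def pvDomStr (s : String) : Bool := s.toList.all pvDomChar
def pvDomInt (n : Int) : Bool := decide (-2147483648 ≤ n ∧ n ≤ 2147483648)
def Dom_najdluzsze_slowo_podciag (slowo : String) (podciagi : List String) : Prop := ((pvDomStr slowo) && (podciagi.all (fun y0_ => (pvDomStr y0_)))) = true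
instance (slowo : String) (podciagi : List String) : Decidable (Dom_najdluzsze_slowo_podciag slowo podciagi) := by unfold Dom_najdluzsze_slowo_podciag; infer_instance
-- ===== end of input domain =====

-- B replaces A's per-candidate two-pointer rescans of slowo by a subsequence automaton
-- (next-occurrence table built once over slowo), then takes max by length over the filtered candidates.

-- ===== PORT A =====
-- the two-pointer while loop: i walks slowo, j walks podciag; result is (j == len(podciag))
def pvAWhile : List Char → List Char → Bool
  | _, [] => true
  | [], _ :: _ => false
  | c :: s, d :: t => if c == d then pvAWhile s t else pvAWhile s (d :: t)

def najdluzsze_slowo_podciag (slowo : String) (podciagi : List String) : String :=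
  podciagi.foldl
    (fun najdluzsze podciag =>
      if pvAWhile slowo.toList podciag.toList
          && decide (podciag.toList.length > najdluzsze.toList.length)
      then podciag else najdluzsze) ""

-- ===== PORT B =====
-- loop body of B's table build: nxt[i] = dict(nxt[i+1]) with nxt[i][slowo[i]] = i
def pvNxt : List Char → Int → PySem.Dict Char Int
  | [], _ => PySem.Dict.empty
  | c :: rest, i => (pvNxt rest (i + 1)).insert c i

-- the table list nxt itself, built back to front as in B
def pvTabs : List Char → Int → List (PySem.Dict Char Int)
  | [], _ => [PySem.Dict.empty]
  | c :: rest, i => pvNxt (c :: rest) i :: pvTabs rest (i + 1)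

-- is_sub: jump through the table, i = nxt[i].get(c) + 1
def pvQuery (tabs : List (PySem.Dict Char Int)) : Int → List Char → Bool
  | _, [] => true
  | i, c :: t =>
    match PySem.List.pyGet? tabs i with
    | none => false
    | some d =>
      match d.get? c with
      | none => false
      | some j => pvQuery tabs (j + 1) t

-- max(key=len, default="") : first element of maximal length, "" on empty input
def pvMaxLenFirst : List String → String
  | [] => ""
  | x :: xs => xs.foldl (fun m p => if decide (p.toList.length > m.toList.length) then p else m) x

def najdluzsze_slowo_podciag_alt (slowo : String) (podciagi : List String) : String :=
  let tabs := pvTabs slowo.toList 0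
  pvMaxLenFirst (podciagi.filter (fun p => pvQuery tabs 0 p.toList))

-- ===== PRECONDITION & SPEC =====
def Spec_najdluzsze_slowo_podciag (slowo : String) (podciagi : List String) (out : String) : Prop := out = najdluzsze_slowo_podciag_alt slowo podciagi
instance (slowo : String) (podciagi : List String) (out : String) : Decidable (Spec_najdluzsze_slowo_podciag slowo podciagi out) := by unfold Spec_najdluzsze_slowo_podciag; infer_instance

-- ===== CLAIM (what is proved, stated in full; the proofs are below) =====
def Claim_equal_najdluzsze_slowo_podciag : Prop := ∀ (slowo : String) (podciagi : List String), Dom_najdluzsze_slowo_podciag slowo podciagi → Spec_najdluzsze_slowo_podciag slowo podciagi (najdluzsze_slowo_podciag slowo podciagi)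

-- ===== LEMMAS AND PROOFS =====

-- proof-only greedy subsequence test via consume-to-first-occurrence
def pvConsume : List Char → Char → Option (List Char)
  | [], _ => none
  | x :: xs, c => if x == c then some xs else pvConsume xs c

def pvGreedy (s : List Char) : List Char → Bool
  | [] => true
  | c :: t =>
    match pvConsume s c with
    | none => false
    | some s' => pvGreedy s' t

theorem pvGreedy_eq_pvAWhile : ∀ (s t : List Char), pvGreedy s t = pvAWhile s t := by
  intro s
  induction s with
  | nil => intro t; cases t <;> simp [pvGreedy, pvAWhile, pvConsume]
  | cons c s ih =>
    intro t
    cases t with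
    | nil => simp [pvGreedy, pvAWhile]
    | cons d t =>
      by_cases h : c = d
      · simp [pvGreedy, pvAWhile, pvConsume, h, ih]
      · have hb : (c == d) = false := by simp [h]
        simp only [pvGreedy, pvAWhile, pvConsume, hb]
        rw [← ih (d :: t)]
        simp [pvGreedy]

theorem pvConsume_eq_findIdx : ∀ (s : List Char) (c : Char),
    pvConsume s c = (s.findIdx? (fun x => x == c)).map (fun k => s.drop (k + 1)) := by
  intro s c
  induction s with
  | nil => simp [pvConsume]
  | cons x xs ih =>
    by_cases h : x = c
    · simp [pvConsume, h, List.findIdx?_cons]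
    · have hb : (x == c) = false := by simp [h]
      simp only [pvConsume, hb, List.findIdx?_cons, ih]
      cases List.findIdx? (fun x => x == c) xs <;> simp

theorem pvNxt_get : ∀ (s : List Char) (i : Int) (c : Char),
    (pvNxt s i).get? c = (s.findIdx? (fun x => x == c)).map (fun k : Nat => i + (k : Int)) := by
  intro s
  induction s with
  | nil => intro i c; simp [pvNxt, List.findIdx?_nil, PySem.Dict.get?_empty]
  | cons x xs ih =>
    intro i c
    by_cases h : c = x
    · simp [pvNxt, h, PySem.Dict.get?_insert_self, List.findIdx?_cons]
    · have hb : (x == c) = false := by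
        simp only [beq_eq_false_iff_ne, ne_eq]
        exact fun e => h e.symm
      simp only [pvNxt, PySem.Dict.get?_insert_of_ne _ _ h, List.findIdx?_cons, hb, ih]
      cases List.findIdx? (fun x => x == c) xs
      · simp
      · simp
        omega

theorem pvTabs_get : ∀ (s : List Char) (i : Int) (j : Nat), j ≤ s.length →
    (pvTabs s i)[j]? = some (pvNxt (s.drop j) (i + j)) := by
  intro s
  induction s with
  | nil =>
    intro i j hj
    have hj0 : j = 0 := Nat.le_zero.mp hj
    subst hj0
    simp [pvTabs, pvNxt]
  | cons x xs ih =>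
    intro i j hj
    cases j with
    | zero => simp [pvTabs]
    | succ j' =>
      have h' : j' ≤ xs.length := by simpa using hj
      simp only [pvTabs, List.getElem?_cons_succ, List.drop_succ_cons]
      rw [ih (i + 1) j' h']
      congr 2
      push_cast
      ring

theorem pvQuery_eq_pvGreedy (s : List Char) :
    ∀ (t : List Char) (j : Nat), j ≤ s.length →
      pvQuery (pvTabs s 0) (j : Int) t = pvGreedy (s.drop j) t := by
  intro t
  induction t with
  | nil => intro j hj; simp [pvQuery, pvGreedy]
  | cons c t ih =>
    intro j hj
    have hget : PySem.List.pyGet? (pvTabs s 0) (j : Int) = some (pvNxt (s.drop j) j) := by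
      rw [PySem.List.pyGet?_natCast, pvTabs_get s 0 j hj]
      simp
    simp only [pvQuery, hget, pvNxt_get, pvGreedy, pvConsume_eq_findIdx]
    cases hfi : (s.drop j).findIdx? (fun x => x == c) with
    | none => simp
    | some k =>
      have hk : k < (s.drop j).length := (List.findIdx?_eq_some_iff_getElem.mp hfi).1
      have hk' : j + (k + 1) ≤ s.length := by
        have := List.length_drop (l := s) (i := j)
        omega
      have hcast : ((j : Int) + (k : Int)) + 1 = ((j + (k + 1) : Nat) : Int) := by omega
      have hdd : (s.drop j).drop (k + 1) = s.drop (j + (k + 1)) := by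
        rw [List.drop_drop]
      simp only [Option.map_some, hdd]
      rw [hcast]
      exact ih (j + (k + 1)) hk'

theorem pvFoldl_filter_if (q : String → Bool) :
    ∀ (l : List String) (init : String),
      l.foldl (fun n p => if q p && decide (p.toList.length > n.toList.length) then p else n) init
      = (l.filter q).foldl (fun n p => if decide (p.toList.length > n.toList.length) then p else n) init := by
  intro l
  induction l with
  | nil => intro init; rfl
  | cons x xs ih =>
    intro init
    by_cases h : q x = true
    · simp only [List.foldl_cons, List.filter_cons, h, Bool.true_and]
      exact ih _
    · have hf : q x = false := by simpa using h
      simp only [List.foldl_cons, List.filter_cons, hf, Bool.false_and,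
        Bool.false_eq_true, if_false]
      exact ih init

theorem pvMaxLenFirst_eq_foldl :
    ∀ (l : List String),
      pvMaxLenFirst l
        = l.foldl (fun m p => if decide (p.toList.length > m.toList.length) then p else m) "" := by
  intro l
  cases l with
  | nil => rfl
  | cons x xs =>
    have e0 : ("" : String).toList = ([] : List Char) := by simp
    simp only [pvMaxLenFirst, List.foldl_cons, e0, List.length_nil]
    by_cases h : x.toList.length > 0
    · have hd : decide (x.toList.length > 0) = true := by simpa using h
      rw [if_pos hd]
    · have hnil : x.toList = [] := List.eq_nil_of_length_eq_zero (Nat.eq_zero_of_not_pos h)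
      have hx : x = "" := String.toList_eq_nil_iff.mp hnil
      simp [hx, e0]

-- ===== VERDICT (by name: the statement is the Claim_ definition above) =====
theorem najdluzsze_slowo_podciag_spec : Claim_equal_najdluzsze_slowo_podciag := by
  intro slowo podciagi _
  unfold Spec_najdluzsze_slowo_podciag najdluzsze_slowo_podciag najdluzsze_slowo_podciag_alt
  simp only []
  rw [pvMaxLenFirst_eq_foldl, ← pvFoldl_filter_if]
  congr 1
  funext n p
  have hq : pvQuery (pvTabs slowo.toList 0) 0 p.toList = pvAWhile slowo.toList p.toList := by
    have := pvQuery_eq_pvGreedy slowo.toList p.toList 0 (Nat.zero_le _)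
    simpa [pvGreedy_eq_pvAWhile] using this
  rw [hq]
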